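-- pv_equiv track=rewrite | github.com/huikinglam02gmail/Leetcode_solutions | 3759.count-elements-with-at-least-k-greater-values.py | countElements
-- ===== SOURCE A (Python) =====
-- from bisect import bisect_right
-- from typing import List
--
-- def countElements(nums: List[int], k: int) -> int:
--     nums.sort()
--     result = 0
--     n = len(nums)
--     for num in nums:
--         if n - bisect_right(nums, num) >= k:
--             result += 1
--     return result
-- ===== SOURCE B (Python) =====
-- from typing import List
--
-- def countElements(nums: List[int], k: int) -> int:
--     # One descending pass over the sorted list, maintaining the count of
--     # strictly greater elements seen so far; no binary searches.
--     nums.sort()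
--     result = 0
--     greater = 0
--     seen = 0
--     prev = None
--     for num in reversed(nums):
--         if prev is None or num != prev:
--             greater = seen
--             prev = num
--         if greater >= k:
--             result += 1
--         seen += 1
--     return result
-- ===== Notes on version B (the rewrite author's own statement) =====
-- stated objective: faster
-- what changed: Replaces the per-element bisect_right binary search over the sorted array with a single descending pass maintaining an accumulator of strictly-greater elements seen so far.
import Mathlib
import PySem

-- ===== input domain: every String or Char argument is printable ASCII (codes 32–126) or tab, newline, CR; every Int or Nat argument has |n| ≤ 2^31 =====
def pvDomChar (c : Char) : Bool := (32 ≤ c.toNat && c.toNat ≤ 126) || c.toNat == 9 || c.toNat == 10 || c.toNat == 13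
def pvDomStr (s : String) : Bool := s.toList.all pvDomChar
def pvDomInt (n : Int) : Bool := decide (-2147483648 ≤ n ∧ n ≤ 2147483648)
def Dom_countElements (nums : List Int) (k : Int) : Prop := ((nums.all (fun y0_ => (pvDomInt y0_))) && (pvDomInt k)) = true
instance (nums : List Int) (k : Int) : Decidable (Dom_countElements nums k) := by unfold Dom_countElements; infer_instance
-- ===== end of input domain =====

-- B replaces A's per-element bisect_right with one descending pass over the sorted list that
-- maintains a strictly-greater accumulator; both sort nums in place (identical mutation), the
-- theorems below are about the return value.

-- ===== PORT A =====
def countElements (nums : List Int) (k : Int) : Int :=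
  let s := PySem.List.sorted nums (fun x => x)
  let n : Int := (s.length : Int)
  s.foldl (fun result num =>
    if k ≤ n - (PySem.List.bisectRight s num : Int) then result + 1 else result) 0

-- ===== PORT B =====
-- one loop step of B: state = (result, greater, seen, prev)
def bstep (k : Int) (st : Int × Int × Int × Option Int) (num : Int) :
    Int × Int × Int × Option Int :=
  let reset : Bool := match st.2.2.2 with | none => true | some p => decide (num ≠ p)
  let g := if reset then st.2.2.1 else st.2.1
  (if k ≤ g then st.1 + 1 else st.1, g, st.2.2.1 + 1, some num)

def countElements_alt (nums : List Int) (k : Int) : Int :=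
  let s := PySem.List.sorted nums (fun x => x)
  (s.reverse.foldl (bstep k) (0, 0, 0, none)).1

-- ===== PRECONDITION & SPEC =====
def Spec_countElements (nums : List Int) (k : Int) (out : Int) : Prop := out = countElements_alt nums k
instance (nums : List Int) (k : Int) (out : Int) : Decidable (Spec_countElements nums k out) := by unfold Spec_countElements; infer_instance

-- ===== CLAIM (what is proved, stated in full; the proofs are below) =====
def Claim_equal_countElements : Prop := ∀ (nums : List Int) (k : Int), Dom_countElements nums k → Spec_countElements nums k (countElements nums k)

-- ===== LEMMAS AND PROOFS =====

-- number of elements of s strictly greater than x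
def gtc (s : List Int) (x : Int) : Nat := s.countP (fun y => decide (x < y))

-- glast consumed = the 'greater' accumulator B holds after consuming exactly 'consumed'
def glast (consumed : List Int) : Int :=
  match consumed.getLast? with | none => 0 | some p => ((gtc consumed p : Nat) : Int)

-- a counting fold equals countP
theorem foldl_count (p : Int → Bool) (l : List Int) (a : Int) :
    l.foldl (fun r y => if p y then r + 1 else r) a = a + (l.countP p : Int) := by
  induction l generalizing a with
  | nil => simp
  | cons x t ih =>
      simp only [List.foldl_cons, List.countP_cons, ih]
      by_cases h : p x = true
      · simp [h]; ring
      · simp [h]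

theorem bisectRight_gtc (s : List Int) (x : Int)
    (hs : List.Pairwise (fun a b => a ≤ b) s) :
    (s.length : Int) - (PySem.List.bisectRight s x : Int) = (gtc s x : Int) := by
  obtain ⟨hle, hlo, hhi⟩ := PySem.List.bisectRight_spec s x hs
  set b := PySem.List.bisectRight s x with hb
  have hsplit : s = s.take b ++ s.drop b := (List.take_append_drop b s).symm
  have ht : (s.take b).countP (fun y => decide (x < y)) = 0 := by
    refine List.countP_eq_zero.2 ?_
    intro a ha
    obtain ⟨i, hi, rfl⟩ := List.mem_take_iff_getElem.1 ha
    have := hlo i (lt_of_lt_of_le (lt_of_lt_of_le hi (min_le_right _ _)) le_rfl) (lt_of_lt_of_le hi (min_le_left _ _))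
    simpa using not_lt.2 this
  have hd : (s.drop b).countP (fun y => decide (x < y)) = (s.drop b).length := by
    refine List.countP_eq_length.2 ?_
    intro a ha
    obtain ⟨i, hi, rfl⟩ := List.mem_drop_iff_getElem.1 ha
    simp only [decide_eq_true_eq]; have := hhi (i + b) hi (Nat.le_add_left _ _); simpa [Nat.add_comm] using this
  have : gtc s x = s.length - b := by
    unfold gtc
    conv_lhs => rw [hsplit]
    rw [List.countP_append, ht, hd, List.length_drop]; omega
  rw [this]
  omega

theorem all_gt (consumed : List Int) (num p : Int) (hl : consumed.getLast? = some p)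
    (hpair : List.Pairwise (fun a b => b ≤ a) consumed)
    (hge : ∀ a ∈ consumed, num ≤ a) (hne : num ≠ p) : ∀ a ∈ consumed, num < a := by
  have hnz : consumed ≠ [] := by intro h; simp [h] at hl
  have hp' : consumed.getLast hnz = p := by
    have := List.getLast?_eq_some_getLast hnz; rw [hl] at this; exact (Option.some_inj.1 this).symm
  have hnp : num < p := lt_of_le_of_ne (hge p (by rw [← hp']; exact List.getLast_mem hnz)) hne
  have hsplit : consumed.dropLast ++ [p] = consumed := by rw [← hp']; exact List.dropLast_append_getLast hnz
  intro a ha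
  rw [← hsplit] at ha
  rcases List.mem_append.1 ha with h | h
  · have hrel : ∀ b ∈ consumed.dropLast, ∀ c ∈ [p], c ≤ b := by
      have := (List.pairwise_append.1 (by rw [hsplit]; exact hpair)).2.2
      exact this
    exact lt_of_lt_of_le hnp (hrel a h p (by simp))
  · simp at h; omega

theorem bloop_inv (k : Int) : ∀ (r consumed : List Int) (res : Int),
    List.Pairwise (fun a b => b ≤ a) (consumed ++ r) →
    (r.foldl (bstep k) (res, glast consumed, (consumed.length : Int), consumed.getLast?)).1
      = res + (r.countP (fun x => decide (k ≤ ((gtc (consumed ++ r) x : Nat) : Int))) : Int) := by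
  intro r
  induction r with
  | nil => intro consumed res _; simp
  | cons num r' ih =>
      intro consumed res hp
      obtain ⟨hc, hnr, hcross⟩ := List.pairwise_append.1 hp
      have hge : ∀ a ∈ consumed, num ≤ a := fun a ha => hcross a ha num (List.mem_cons_self ..)
      have hr'le : ∀ b ∈ r', b ≤ num := (List.pairwise_cons.1 hnr).1
      have hg : (if (match consumed.getLast? with | none => true | some p => decide (num ≠ p))
            then (consumed.length : Int) else glast consumed) = ((gtc consumed num : Nat) : Int) := by
        cases hcl : consumed.getLast? with
        | none =>
            have hnil : consumed = [] := List.getLast?_eq_none_iff.1 hcl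
            subst hnil; simp [gtc]
        | some p =>
            by_cases hnum : num = p
            · subst hnum; simp [glast, hcl]
            · have hall := all_gt consumed num p hcl hc hge hnum
              have hlen : gtc consumed num = consumed.length :=
                List.countP_eq_length.2 (fun a ha => decide_eq_true (hall a ha))
              simp [hnum, hlen]
      have hnum0 : List.countP (fun y => decide (num < y)) (num :: r') = 0 := by
        refine List.countP_eq_zero.2 ?_
        intro a ha
        rcases List.mem_cons.1 ha with rfl | h
        · simp
        · simpa using not_lt.2 (hr'le a h)
      have hwhole : gtc (consumed ++ num :: r') num = gtc consumed num := by
        unfold gtc; rw [List.countP_append, hnum0]; omega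
      have hglast : glast (consumed ++ [num]) = ((gtc consumed num : Nat) : Int) := by
        simp only [glast, List.getLast?_concat]
        have : gtc (consumed ++ [num]) num = gtc consumed num := by
          unfold gtc; rw [List.countP_append]; simp
        rw [this]
      have hstep : bstep k (res, glast consumed, (consumed.length : Int), consumed.getLast?) num
          = (if k ≤ ((gtc consumed num : Nat) : Int) then res + 1 else res,
             glast (consumed ++ [num]), ((consumed ++ [num]).length : Int),
             (consumed ++ [num]).getLast?) := by
        simp only [bstep, hg]
        refine Prod.ext ?_ (Prod.ext ?_ (Prod.ext ?_ ?_)) <;> simp [hglast]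
      have hpair' : List.Pairwise (fun a b => b ≤ a) ((consumed ++ [num]) ++ r') := by
        rw [List.append_assoc]; simpa using hp
      have hcntarg : ∀ x, gtc ((consumed ++ [num]) ++ r') x = gtc (consumed ++ num :: r') x := by
        intro x; rw [List.append_assoc]; simp
      calc (List.foldl (bstep k) (res, glast consumed, (consumed.length : Int), consumed.getLast?) (num :: r')).1
          = (List.foldl (bstep k)
              ((if k ≤ ((gtc consumed num : Nat) : Int) then res + 1 else res),
               glast (consumed ++ [num]), ((consumed ++ [num]).length : Int),
               (consumed ++ [num]).getLast?) r').1 := by rw [List.foldl_cons, hstep]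
        _ = (if k ≤ ((gtc consumed num : Nat) : Int) then res + 1 else res)
              + (r'.countP (fun x => decide (k ≤ ((gtc ((consumed ++ [num]) ++ r') x : Nat) : Int))) : Int) :=
            ih (consumed ++ [num]) _ hpair'
        _ = res + ((num :: r').countP (fun x => decide (k ≤ ((gtc (consumed ++ num :: r') x : Nat) : Int))) : Int) := by
            have hpred : (fun x => decide (k ≤ ((gtc ((consumed ++ [num]) ++ r') x : Nat) : Int)))
                = (fun x => decide (k ≤ ((gtc (consumed ++ num :: r') x : Nat) : Int))) := by
              funext x; rw [hcntarg]
            rw [hpred, List.countP_cons]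
            by_cases hk : k ≤ ((gtc consumed num : Nat) : Int)
            · rw [if_pos hk]
              have : decide (k ≤ ((gtc (consumed ++ num :: r') num : Nat) : Int)) = true := by
                rw [hwhole]; exact decide_eq_true hk
              rw [this]; simp; ring
            · rw [if_neg hk]
              have : decide (k ≤ ((gtc (consumed ++ num :: r') num : Nat) : Int)) = false := by
                rw [hwhole]; exact decide_eq_false hk
              rw [this]; simp

-- ===== VERDICT (by name: the statement is the Claim_ definition above) =====
theorem countElements_spec : Claim_equal_countElements := by
  intro nums k _
  unfold Spec_countElements countElements countElements_alt
  simp only []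
  set s := PySem.List.sorted nums (fun x => x) with hsdef
  have hs : List.Pairwise (fun a b => a ≤ b) s := PySem.List.sorted_pairwise nums (fun x => x)
  have hrev : List.Pairwise (fun a b => b ≤ a) (([] : List Int) ++ s.reverse) := by
    simpa [List.pairwise_reverse] using hs
  have hB := bloop_inv k s.reverse [] 0 hrev
  have hinit : glast ([] : List Int) = 0 := rfl
  have hA := foldl_count (fun num => decide (k ≤ (s.length : Int) - (PySem.List.bisectRight s num : Int))) s 0
  have hpred : (fun num => decide (k ≤ (s.length : Int) - (PySem.List.bisectRight s num : Int)))
      = (fun x => decide (k ≤ ((gtc s x : Nat) : Int))) := by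
    funext x; rw [bisectRight_gtc s x hs]
  have hArw : s.foldl (fun result num =>
      if k ≤ (s.length : Int) - (PySem.List.bisectRight s num : Int) then result + 1 else result) 0
      = ((s.countP (fun x => decide (k ≤ ((gtc s x : Nat) : Int))) : Nat) : Int) := by
    simp only [decide_eq_true_eq] at hA
    rw [hA, hpred]; ring
  have hBpred : (fun x => decide (k ≤ ((gtc (([] : List Int) ++ s.reverse) x : Nat) : Int)))
      = (fun x => decide (k ≤ ((gtc s x : Nat) : Int))) := by
    funext x
    have : gtc (([] : List Int) ++ s.reverse) x = gtc s x := by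
      unfold gtc; simp
    rw [this]
  have hBrw : (s.reverse.foldl (bstep k) (0, 0, 0, none)).1
      = ((s.countP (fun x => decide (k ≤ ((gtc s x : Nat) : Int))) : Nat) : Int) := by
    have h0 : ((0 : Int), (0 : Int), (0 : Int), (none : Option Int))
        = (0, glast ([] : List Int), ((([] : List Int)).length : Int), ([] : List Int).getLast?) := rfl
    rw [h0, hB, hBpred]
    simp [List.countP_reverse]
  rw [hArw, hBrw]
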